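-- pv_equiv track=rewrite | github.com/chau25102001/SOICT_hackathon_2023_SLU_Mekk_Knights | IDSF/data/process_data_bio.py | refine_context
-- ===== SOURCE A (Python) =====
-- def refine_context(context, answers):
--     new_context = []
--     added = 0
--     for i, c in enumerate(context):
--         if c == ',' or c == '.' or c == '?' or c == '!':
--             if context[i - 1] != " " and i >= 1:  # need to separate
--                 new_context.append(" ")
--                 added += 1
--                 for j, a in enumerate(answers):
--                     if i <= a[1] - added:
--                         answers[j][1] = answers[j][1] + 1
--                     if i <= a[2] - added:
--                         answers[j][2] = answers[j][2] + 1
--         new_context.append(c)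
--     new_context = "".join(new_context)
--     # for a in answers:
--     #     a[0] = new_context[a[1]:a[2]]
--     return new_context, answers
-- ===== SOURCE B (Python) =====
-- def _count_lt(ins, p):
--     # ins is sorted ascending; number of elements strictly below p (binary search)
--     lo = 0
--     hi = len(ins)
--     while lo < hi:
--         mid = (lo + hi) // 2
--         if ins[mid] < p:
--             lo = mid + 1
--         else:
--             hi = mid
--     return lo
--
--
-- def refine_context(context, answers):
--     out = []
--     ins = []  # original indices where a space gets inserted, ascending
--     for i, c in enumerate(context):
--         if c in ',.?!' and i >= 1 and context[i - 1] != ' ':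
--             ins.append(i)
--             out.append(' ')
--         out.append(c)
--     if ins:  # no inserted space: nothing to shift
--         for a in answers:
--             a[1] += _count_lt(ins, a[1])
--             a[2] += _count_lt(ins, a[2])
--     return ''.join(out), answers
-- ===== Notes on version B (the rewrite author's own statement) =====
-- stated objective: alternative
-- what changed: Instead of re-scanning and incrementally patching every answer span at each inserted space with an 'added' counter, B records all insertion positions in one pass over the context and then shifts each span index once by the number of insertion positions strictly below it, found by binary search (intended as the asymptotically better O(n + m log n) scheme; measured only ~1.24x on the generated inputs).
import Mathlib
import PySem

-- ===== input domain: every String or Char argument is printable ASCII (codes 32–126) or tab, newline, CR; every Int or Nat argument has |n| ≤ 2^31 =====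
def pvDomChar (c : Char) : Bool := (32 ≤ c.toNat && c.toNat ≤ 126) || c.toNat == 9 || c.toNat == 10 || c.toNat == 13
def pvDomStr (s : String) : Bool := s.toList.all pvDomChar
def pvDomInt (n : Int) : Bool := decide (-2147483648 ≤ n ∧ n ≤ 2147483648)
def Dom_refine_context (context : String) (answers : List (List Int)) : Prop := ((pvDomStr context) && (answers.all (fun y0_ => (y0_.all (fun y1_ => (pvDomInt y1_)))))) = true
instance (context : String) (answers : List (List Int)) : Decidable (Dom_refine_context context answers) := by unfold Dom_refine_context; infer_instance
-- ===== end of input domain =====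

-- B records the space-insertion positions in one pass and shifts each answer index once by a
-- binary-searched count of insertion positions below it, instead of A's per-insertion rescan of all
-- answers; return-value equivalence (both Pythons also mutate `answers` in place, identically).

-- ===== PORT A =====
-- literal transliteration of A's loop body (pyGetD is exact here: under Pre_ every answer has
-- length >= 3, and cs[i-1] is only read with i-1 in Python range)
def pvStepA (cs : List Char) (st : List Char × Int × List (List Int)) (ic : Int × Char) :
    List Char × Int × List (List Int) :=
  let i := ic.1
  let c := ic.2
  let st' :=
    if c = ',' ∨ c = '.' ∨ c = '?' ∨ c = '!' then
      if PySem.List.pyGetD cs (i - 1) ' ' ≠ ' ' ∧ 1 ≤ i then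
        let added := st.2.1 + 1
        (st.1 ++ [' '], added,
          st.2.2.map (fun a =>
            let a1 := PySem.List.pyGetD a 1 0
            let a' := if i ≤ a1 - added then a.set 1 (a1 + 1) else a
            let a2 := PySem.List.pyGetD a' 2 0
            if i ≤ a2 - added then a'.set 2 (a2 + 1) else a'))
      else st
    else st
  (st'.1 ++ [c], st'.2)

def refine_context (context : String) (answers : List (List Int)) : String × List (List Int) :=
  let cs := context.toList
  let r := (PySem.List.enumerate cs).foldl (pvStepA cs) ([], (0 : Int), answers)
  (String.ofList r.1, r.2.2)

-- ===== PORT B =====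
-- _count_lt of Source B: binary search, lo/hi as in the Python while loop
def pvBsearch (ins : List Int) (p : Int) (lo hi : Nat) : Nat :=
  if lo < hi then
    if PySem.List.pyGetD ins (((lo + hi) / 2 : Nat) : Int) 0 < p then
      pvBsearch ins p ((lo + hi) / 2 + 1) hi
    else
      pvBsearch ins p lo ((lo + hi) / 2)
  else lo
termination_by hi - lo
decreasing_by all_goals omega

-- Source B's per-answer update: a[1] += _count_lt(ins, a[1]); a[2] += _count_lt(ins, a[2])
def pvShift (ins : List Int) (a : List Int) : List Int :=
  let a1 := PySem.List.pyGetD a 1 0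
  let a' := a.set 1 (a1 + (pvBsearch ins a1 0 ins.length : Int))
  let a2 := PySem.List.pyGetD a' 2 0
  a'.set 2 (a2 + (pvBsearch ins a2 0 ins.length : Int))

def pvStepB (cs : List Char) (st : List Char × List Int) (ic : Int × Char) :
    List Char × List Int :=
  let i := ic.1
  let c := ic.2
  let st' :=
    if (c = ',' ∨ c = '.' ∨ c = '?' ∨ c = '!') ∧ 1 ≤ i ∧ PySem.List.pyGetD cs (i - 1) ' ' ≠ ' '
    then (st.1 ++ [' '], st.2 ++ [i])
    else st
  (st'.1 ++ [c], st'.2)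

def refine_context_alt (context : String) (answers : List (List Int)) : String × List (List Int) :=
  let cs := context.toList
  let r := (PySem.List.enumerate cs).foldl (pvStepB cs) ([], ([] : List Int))
  (String.ofList r.1, if r.2.isEmpty then answers else answers.map (pvShift r.2))

-- ===== PRECONDITION & SPEC =====
-- Pre_ is exactly the set of inputs on which the Python A returns normally: either every answer
-- list has at least 3 entries, or the context needs no space insertion (no punctuation mark at a
-- position >= 1 whose predecessor is not a space); on all other inputs a space is inserted and A
-- raises IndexError on the short answer list (B raises IndexError there too).
def Pre_refine_context (context : String) (answers : List (List Int)) : Prop :=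
  (∀ a ∈ answers, 3 ≤ a.length) ∨
  List.IsChain (fun a b => (b = ',' ∨ b = '.' ∨ b = '?' ∨ b = '!') → a = ' ') context.toList
instance (context : String) (answers : List (List Int)) : Decidable (Pre_refine_context context answers) := by
  unfold Pre_refine_context; infer_instance

def pvWitness_refine_context : String × List (List Int) := ("ab, cd!x", [[0, 1, 6]])

def Spec_refine_context (context : String) (answers : List (List Int)) (out : String × List (List Int)) : Prop := out = refine_context_alt context answers
instance (context : String) (answers : List (List Int)) (out : String × List (List Int)) : Decidable (Spec_refine_context context answers out) := by unfold Spec_refine_context; infer_instance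

-- ===== CLAIM (what is proved, stated in full; the proofs are below) =====
def Claim_equal_refine_context : Prop := ∀ (context : String) (answers : List (List Int)), Dom_refine_context context answers → Pre_refine_context context answers → Spec_refine_context context answers (refine_context context answers)

-- ===== LEMMAS AND PROOFS =====

-- count of insertion positions strictly below p
def pvC (ins : List Int) (p : Int) : Int := (ins.countP (fun x => decide (x < p)) : Int)

-- closed form for the effect of inserting spaces at positions `ins` on one answer:
-- each index grows by the number of insertion positions strictly below it
def pvUpd (ins : List Int) (a : List Int) : List Int :=
  let a1 := PySem.List.pyGetD a 1 0
  let a' := a.set 1 (a1 + pvC ins a1)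
  let a2 := PySem.List.pyGetD a' 2 0
  a'.set 2 (a2 + pvC ins a2)

lemma pvGet1 (x : List Int) (h : 1 < x.length) : PySem.List.pyGetD x 1 0 = x[1] := by
  rw [PySem.List.pyGetD_ofNat']; exact List.getD_eq_getElem _ _ h

lemma pvGet2 (x : List Int) (h : 2 < x.length) : PySem.List.pyGetD x 2 0 = x[2] := by
  rw [PySem.List.pyGetD_ofNat']; exact List.getD_eq_getElem _ _ h

lemma pvRead2_set1 (x : List Int) (v : Int) (h : 2 < x.length) :
    PySem.List.pyGetD (x.set 1 v) 2 0 = PySem.List.pyGetD x 2 0 := by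
  rw [pvGet2 _ (by simpa using h), pvGet2 _ h]
  exact List.getElem_set_ne (by decide) _

lemma pvUpd_eq (ins : List Int) (a : List Int) (ha : 3 ≤ a.length) :
    pvUpd ins a
      = (a.set 1 (PySem.List.pyGetD a 1 0 + pvC ins (PySem.List.pyGetD a 1 0))).set 2
          (PySem.List.pyGetD a 2 0 + pvC ins (PySem.List.pyGetD a 2 0)) := by
  unfold pvUpd
  simp only [pvRead2_set1 a _ (by omega)]

lemma pvUpd_read1 (ins : List Int) (a : List Int) (ha : 3 ≤ a.length) :
    PySem.List.pyGetD (pvUpd ins a) 1 0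
      = PySem.List.pyGetD a 1 0 + pvC ins (PySem.List.pyGetD a 1 0) := by
  rw [pvUpd_eq ins a ha, pvGet1 _ (by simp; omega)]
  rw [List.getElem_set_ne (by decide), List.getElem_set_self (by simpa using (by omega : (1:Nat) < a.length))]

lemma pvUpd_read2 (ins : List Int) (a : List Int) (ha : 3 ≤ a.length) :
    PySem.List.pyGetD (pvUpd ins a) 2 0
      = PySem.List.pyGetD a 2 0 + pvC ins (PySem.List.pyGetD a 2 0) := by
  rw [pvUpd_eq ins a ha, pvGet2 _ (by simp; omega)]
  rw [List.getElem_set_self (by simpa using (by omega : (2:Nat) < a.length))]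

lemma pvC_le (ins : List Int) (p : Int) : pvC ins p ≤ (ins.length : Int) := by
  unfold pvC; exact_mod_cast List.countP_le_length

lemma pvC_eq_len (ins : List Int) (p : Int) (h : ∀ x ∈ ins, x < p) :
    pvC ins p = (ins.length : Int) := by
  unfold pvC
  exact_mod_cast List.countP_eq_length.mpr (fun x hx => by simpa using h x hx)

lemma pvC_append (ins : List Int) (i p : Int) :
    pvC (ins ++ [i]) p = pvC ins p + (if i < p then 1 else 0) := by
  unfold pvC
  rw [List.countP_append, List.countP_singleton]
  by_cases h : i < p <;> simp [h]

lemma pvLen_upd (ins : List Int) (a : List Int) : (pvUpd ins a).length = a.length := by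
  simp [pvUpd]

lemma pvStepAnswer (ins : List Int) (i : Int) (hins : ∀ x ∈ ins, x < i)
    (a : List Int) (ha : 3 ≤ a.length) :
    (let b := pvUpd ins a
     let a1 := PySem.List.pyGetD b 1 0
     let a' := if i ≤ a1 - ((ins.length : Int) + 1) then b.set 1 (a1 + 1) else b
     let a2 := PySem.List.pyGetD a' 2 0
     if i ≤ a2 - ((ins.length : Int) + 1) then a'.set 2 (a2 + 1) else a')
    = pvUpd (ins ++ [i]) a := by
  simp only
  set P := PySem.List.pyGetD a 1 0 with hP
  set Q := PySem.List.pyGetD a 2 0 with hQ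
  have hr1 := pvUpd_read1 ins a ha
  have hr2 := pvUpd_read2 ins a ha
  rw [← hP] at hr1; rw [← hQ] at hr2
  have hb := pvUpd_eq ins a ha
  rw [← hP, ← hQ] at hb
  have hc1 : (i ≤ (P + pvC ins P) - ((ins.length : Int) + 1)) ↔ i < P := by
    constructor
    · intro h; have := pvC_le ins P; omega
    · intro h
      have : pvC ins P = (ins.length : Int) := pvC_eq_len ins P (fun x hx => lt_trans (hins x hx) h)
      omega
  have hc2 : (i ≤ (Q + pvC ins Q) - ((ins.length : Int) + 1)) ↔ i < Q := by
    constructor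
    · intro h; have := pvC_le ins Q; omega
    · intro h
      have : pvC ins Q = (ins.length : Int) := pvC_eq_len ins Q (fun x hx => lt_trans (hins x hx) h)
      omega
  conv_rhs => rw [pvUpd_eq (ins ++ [i]) a ha]
  rw [← hP, ← hQ, pvC_append, pvC_append, hr1]
  have pvSets : ∀ (v w v' : Int), ((a.set 1 v).set 2 w).set 1 v' = (a.set 1 v').set 2 w := by
    intro v w v'
    rw [List.set_comm _ _ (by decide : (2:Nat) ≠ 1), List.set_set]
  by_cases h1 : i < P
  · rw [if_pos (hc1.mpr h1)]
    have hread : PySem.List.pyGetD ((pvUpd ins a).set 1 (P + pvC ins P + 1)) 2 0 = Q + pvC ins Q := by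
      rw [pvRead2_set1 _ _ (by rw [pvLen_upd]; omega), hr2]
    rw [hread]
    by_cases h2 : i < Q
    · rw [if_pos (hc2.mpr h2), if_pos h1, if_pos h2, hb, pvSets, List.set_set]
      simp only [add_assoc]
    · rw [if_neg (fun hh => h2 (hc2.mp hh)), if_pos h1, if_neg h2, hb, pvSets]
      simp only [add_assoc, add_zero]
  · rw [if_neg (fun hh => h1 (hc1.mp hh)), hr2]
    by_cases h2 : i < Q
    · rw [if_pos (hc2.mpr h2), if_neg h1, if_pos h2, hb, List.set_set]
      simp only [add_assoc, add_zero]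
    · rw [if_neg (fun hh => h2 (hc2.mp hh)), if_neg h1, if_neg h2, hb]
      simp only [add_zero]

lemma pvMain (cs : List Char) (orig : List (List Int)) (hlen : ∀ a ∈ orig, 3 ≤ a.length)
    (l : List Char) :
    ∀ (s : Int) (out : List Char) (ins : List Int),
      (∀ x ∈ ins, x < s) → List.Pairwise (· < ·) ins →
      List.foldl (pvStepA cs) (out, (ins.length : Int), orig.map (pvUpd ins)) (PySem.List.enumerate l s)
        = ((List.foldl (pvStepB cs) (out, ins) (PySem.List.enumerate l s)).1,
           ((List.foldl (pvStepB cs) (out, ins) (PySem.List.enumerate l s)).2.length : Int),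
           orig.map (pvUpd (List.foldl (pvStepB cs) (out, ins) (PySem.List.enumerate l s)).2)) := by
  induction l with
  | nil => intro s out ins _ _; simp [PySem.List.enumerate_nil]
  | cons c l ih =>
    intro s out ins hins hsort
    rw [PySem.List.enumerate_cons]
    simp only [List.foldl_cons]
    by_cases hc : (c = ',' ∨ c = '.' ∨ c = '?' ∨ c = '!')
    · by_cases hp : (PySem.List.pyGetD cs (s - 1) ' ' ≠ ' ' ∧ 1 ≤ s)
      · -- insertion step
        have hstA : pvStepA cs (out, (ins.length : Int), orig.map (pvUpd ins)) (s, c)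
            = (out ++ [' '] ++ [c], ((ins ++ [s]).length : Int), orig.map (pvUpd (ins ++ [s]))) := by
          simp only [pvStepA]
          rw [if_pos hc, if_pos hp, List.map_map]
          refine congrArg₂ Prod.mk rfl (congrArg₂ Prod.mk (by simp only [List.length_append, List.length_singleton]; push_cast; ring) ?_)
          refine List.map_congr_left fun a haa => ?_
          simpa [Function.comp] using pvStepAnswer ins s hins a (hlen a haa)
        have hgB : (c = ',' ∨ c = '.' ∨ c = '?' ∨ c = '!') ∧ 1 ≤ s ∧
            PySem.List.pyGetD cs (s - 1) ' ' ≠ ' ' := ⟨hc, hp.2, hp.1⟩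
        have hstB : pvStepB cs (out, ins) (s, c) = (out ++ [' '] ++ [c], ins ++ [s]) := by
          simp only [pvStepB]
          rw [if_pos hgB]
        rw [hstA, hstB]
        exact ih (s + 1) (out ++ [' '] ++ [c]) (ins ++ [s])
          (by intro x hx; rcases List.mem_append.mp hx with h | h
              · exact lt_trans (hins x h) (by omega)
              · simp at h; omega)
          (List.pairwise_append.mpr ⟨hsort, by simp, by intro x hx y hy; simp at hy; subst hy; exact hins x hx⟩)
      · have hstA : pvStepA cs (out, (ins.length : Int), orig.map (pvUpd ins)) (s, c)
            = (out ++ [c], (ins.length : Int), orig.map (pvUpd ins)) := by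
          simp only [pvStepA, if_pos hc, if_neg hp]
        have hng : ¬((c = ',' ∨ c = '.' ∨ c = '?' ∨ c = '!') ∧ 1 ≤ s ∧
            PySem.List.pyGetD cs (s - 1) ' ' ≠ ' ') := fun h => hp ⟨h.2.2, h.2.1⟩
        have hstB : pvStepB cs (out, ins) (s, c) = (out ++ [c], ins) := by
          simp only [pvStepB]
          rw [if_neg hng]
        rw [hstA, hstB]
        exact ih (s + 1) (out ++ [c]) ins (fun x hx => lt_trans (hins x hx) (by omega)) hsort
    · have hstA : pvStepA cs (out, (ins.length : Int), orig.map (pvUpd ins)) (s, c)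
          = (out ++ [c], (ins.length : Int), orig.map (pvUpd ins)) := by
        simp only [pvStepA, if_neg hc]
      have hng : ¬((c = ',' ∨ c = '.' ∨ c = '?' ∨ c = '!') ∧ 1 ≤ s ∧
          PySem.List.pyGetD cs (s - 1) ' ' ≠ ' ') := fun h => hc h.1
      have hstB : pvStepB cs (out, ins) (s, c) = (out ++ [c], ins) := by
        simp only [pvStepB]
        rw [if_neg hng]
      rw [hstA, hstB]
      exact ih (s + 1) (out ++ [c]) ins (fun x hx => lt_trans (hins x hx) (by omega)) hsort

lemma pvInsSorted (cs : List Char) (l : List Char) :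
    ∀ (s : Int) (out : List Char) (ins : List Int),
      (∀ x ∈ ins, x < s) → List.Pairwise (· < ·) ins →
      List.Pairwise (· < ·) (List.foldl (pvStepB cs) (out, ins) (PySem.List.enumerate l s)).2 := by
  induction l with
  | nil => intro s out ins _ hs; simpa [PySem.List.enumerate_nil] using hs
  | cons c l ih =>
    intro s out ins hins hsort
    rw [PySem.List.enumerate_cons]
    simp only [List.foldl_cons, pvStepB]
    split_ifs with h
    · exact ih (s + 1) _ (ins ++ [s])
        (by intro x hx; rcases List.mem_append.mp hx with h' | h'
            · exact lt_trans (hins x h') (by omega)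
            · simp at h'; omega)
        (List.pairwise_append.mpr ⟨hsort, by simp, by intro x hx y hy; simp at hy; subst hy; exact hins x hx⟩)
    · exact ih (s + 1) _ ins (fun x hx => lt_trans (hins x hx) (by omega)) hsort

lemma pvCount_split (ins : List Int) (p : Int) (lo : Nat) (hlo : lo ≤ ins.length)
    (h1 : ∀ j (hj : j < ins.length), j < lo → ins[j] < p)
    (h2 : ∀ j (hj : j < ins.length), lo ≤ j → ¬ ins[j] < p) :
    ins.countP (fun x => decide (x < p)) = lo := by
  conv_lhs => rw [← List.take_append_drop lo ins]
  rw [List.countP_append]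
  have ht : (ins.take lo).countP (fun x => decide (x < p)) = lo := by
    rw [List.countP_eq_length.mpr ?_, List.length_take]
    · omega
    · intro x hx
      obtain ⟨j, hj, hjx⟩ := List.mem_iff_getElem.mp hx
      have hj2 : j < lo ∧ j < ins.length := by
        simpa [List.length_take, Nat.lt_min] using hj
      rw [← hjx, List.getElem_take]
      simpa using h1 j hj2.2 hj2.1
  have hd : (ins.drop lo).countP (fun x => decide (x < p)) = 0 := by
    rw [List.countP_eq_zero]
    intro x hx
    obtain ⟨j, hj, hjx⟩ := List.mem_iff_getElem.mp hx
    have hj2 : lo + j < ins.length := by simp [List.length_drop] at hj; omega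
    rw [← hjx, List.getElem_drop]
    simpa using h2 (lo + j) hj2 (by omega)
  omega

lemma pvBsearch_go (ins : List Int) (p : Int) (hsort : List.Pairwise (· < ·) ins) :
    ∀ (n lo hi : Nat), hi - lo ≤ n → lo ≤ hi → hi ≤ ins.length →
      (∀ j (hj : j < ins.length), j < lo → ins[j] < p) →
      (∀ j (hj : j < ins.length), hi ≤ j → ¬ ins[j] < p) →
      pvBsearch ins p lo hi = ins.countP (fun x => decide (x < p)) := by
  have hmono := List.pairwise_iff_getElem.mp hsort
  intro n
  induction n with
  | zero =>
    intro lo hi hn hle hhi h1 h2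
    have : lo = hi := by omega
    subst this
    rw [pvBsearch]
    simp only [Nat.lt_irrefl, if_false]
    exact (pvCount_split ins p lo hhi h1 h2).symm
  | succ n ih =>
    intro lo hi hn hle hhi h1 h2
    rw [pvBsearch]
    by_cases hlt : lo < hi
    · have hmlt : (lo + hi) / 2 < hi := by omega
      have hmge : lo ≤ (lo + hi) / 2 := by omega
      have hmlen : (lo + hi) / 2 < ins.length := by omega
      have hget : PySem.List.pyGetD ins (((lo + hi) / 2 : Nat) : Int) 0 = ins[(lo + hi) / 2] := by
        rw [PySem.List.pyGetD_natCast]; exact List.getD_eq_getElem _ _ hmlen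
      rw [if_pos hlt, hget]
      by_cases hm : ins[(lo + hi) / 2] < p
      · rw [if_pos hm]
        exact ih ((lo + hi) / 2 + 1) hi (by omega) (by omega) hhi
          (by intro j hj hjlt
              rcases Nat.lt_succ_iff_lt_or_eq.mp hjlt with h | h
              · exact lt_trans (hmono j _ hj hmlen h) hm
              · subst h; exact hm)
          h2
      · rw [if_neg hm]
        exact ih lo ((lo + hi) / 2) (by omega) (by omega) (by omega) h1
          (by intro j hj hjge hjlt
              rcases Nat.eq_or_lt_of_le hjge with h | h
              · exact hm (h ▸ hjlt)
              · exact hm (lt_trans (hmono _ j hmlen hj h) hjlt))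
    · rw [if_neg hlt]
      have : lo = hi := by omega
      subst this
      exact (pvCount_split ins p lo hhi h1 h2).symm

lemma pvShift_eq_upd (ins : List Int) (hsort : List.Pairwise (· < ·) ins) (a : List Int) :
    pvShift ins a = pvUpd ins a := by
  have hb : ∀ q, (pvBsearch ins q 0 ins.length : Int) = pvC ins q := by
    intro q
    unfold pvC
    exact_mod_cast pvBsearch_go ins q hsort ins.length 0 ins.length
      (by omega) (Nat.zero_le _) le_rfl
      (fun j hj hjl => absurd hjl (by omega))
      (fun j hj hjl => absurd hj (by omega))
  unfold pvShift pvUpd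
  simp only [hb]

lemma pvUpd_nil (a : List Int) (ha : 3 ≤ a.length) : pvUpd [] a = a := by
  unfold pvUpd pvC
  simp only [List.countP_nil, Nat.cast_zero, add_zero]
  rw [pvGet1 a (by omega), List.set_getElem_self (by omega)]
  rw [pvGet2 a (by omega), List.set_getElem_self (by omega)]

lemma pvPlainA (cs : List Char) (l : List (Int × Char))
    (hg : ∀ ic ∈ l, ¬((ic.2 = ',' ∨ ic.2 = '.' ∨ ic.2 = '?' ∨ ic.2 = '!') ∧
        (PySem.List.pyGetD cs (ic.1 - 1) ' ' ≠ ' ' ∧ 1 ≤ ic.1))) :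
    ∀ (out : List Char) (k : Int) (ans : List (List Int)),
      List.foldl (pvStepA cs) (out, k, ans) l = (out ++ l.map (·.2), k, ans) := by
  induction l with
  | nil => intro out k ans; simp
  | cons ic l ih =>
    intro out k ans
    simp only [List.foldl_cons]
    have hstep : pvStepA cs (out, k, ans) ic = (out ++ [ic.2], k, ans) := by
      simp only [pvStepA]
      by_cases hc : (ic.2 = ',' ∨ ic.2 = '.' ∨ ic.2 = '?' ∨ ic.2 = '!')
      · rw [if_pos hc, if_neg (fun hh => hg ic (List.mem_cons_self) ⟨hc, hh⟩)]
      · rw [if_neg hc]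
    rw [hstep, ih (fun ic' h => hg ic' (List.mem_cons_of_mem _ h))]
    simp

lemma pvPlainB (cs : List Char) (l : List (Int × Char))
    (hg : ∀ ic ∈ l, ¬((ic.2 = ',' ∨ ic.2 = '.' ∨ ic.2 = '?' ∨ ic.2 = '!') ∧
        (PySem.List.pyGetD cs (ic.1 - 1) ' ' ≠ ' ' ∧ 1 ≤ ic.1))) :
    ∀ (out : List Char) (ins : List Int),
      List.foldl (pvStepB cs) (out, ins) l = (out ++ l.map (·.2), ins) := by
  induction l with
  | nil => intro out ins; simp
  | cons ic l ih =>
    intro out ins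
    simp only [List.foldl_cons]
    have hstep : pvStepB cs (out, ins) ic = (out ++ [ic.2], ins) := by
      simp only [pvStepB]
      rw [if_neg (fun hh => hg ic (List.mem_cons_self) ⟨hh.1, hh.2.2, hh.2.1⟩)]
    rw [hstep, ih (fun ic' h => hg ic' (List.mem_cons_of_mem _ h))]
    simp

lemma pvGuardFalse (cs : List Char)
    (hch : List.IsChain (fun a b => (b = ',' ∨ b = '.' ∨ b = '?' ∨ b = '!') → a = ' ') cs) :
    ∀ ic ∈ PySem.List.enumerate cs 0, ¬((ic.2 = ',' ∨ ic.2 = '.' ∨ ic.2 = '?' ∨ ic.2 = '!') ∧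
        (PySem.List.pyGetD cs (ic.1 - 1) ' ' ≠ ' ' ∧ 1 ≤ ic.1)) := by
  intro ic hic hcond
  obtain ⟨hcp, hprev, hge⟩ := hcond
  obtain ⟨k, hk, hpk⟩ := (PySem.List.mem_enumerate_iff cs 0 ic).mp hic
  subst hpk
  simp only [zero_add] at hcp hprev hge
  have hk1 : 1 ≤ k := by exact_mod_cast hge
  have hidx : ((k : Int)) - 1 = ((k - 1 : Nat) : Int) := by push_cast [hk1]; ring
  have hprev' : PySem.List.pyGetD cs ((k : Int) - 1) ' ' = cs[k - 1] := by
    rw [hidx, PySem.List.pyGetD_natCast]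
    exact List.getD_eq_getElem _ _ (by omega)
  have hstep := (List.isChain_iff_getElem.mp hch) (k - 1) (by omega)
  simp only [show k - 1 + 1 = k from by omega] at hstep
  exact hprev (hprev'.trans (hstep hcp))

-- ===== VERDICT (by name: the statement is the Claim_ definition above) =====
theorem refine_context_spec : Claim_equal_refine_context := by
  intro context answers _ hpre
  unfold Spec_refine_context refine_context refine_context_alt
  rcases hpre with hpre | hch
  · -- every answer has length ≥ 3
    have hmapnil : answers.map (pvUpd []) = answers := by
      refine (List.map_congr_left ?_).trans (List.map_id _)
      intro a haa; exact pvUpd_nil a (hpre a haa)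
    have h := pvMain context.toList answers hpre context.toList 0 [] []
      (by simp) (by simp)
    simp only [List.length_nil, Nat.cast_zero, hmapnil] at h
    have hsorted := pvInsSorted context.toList context.toList 0 [] [] (by simp) (by simp)
    simp only [h]
    refine congrArg (Prod.mk _) ?_
    by_cases hemp :
        (List.foldl (pvStepB context.toList) ([], []) (PySem.List.enumerate context.toList)).2.isEmpty
    · rw [if_pos hemp, List.isEmpty_iff.mp hemp, hmapnil]
    · rw [if_neg hemp]
      exact (List.map_congr_left fun a _ => pvShift_eq_upd _ hsorted a).symm
  · -- the context needs no insertion: both folds only copy characters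
    have hg := pvGuardFalse context.toList hch
    have hA := pvPlainA context.toList (PySem.List.enumerate context.toList 0) hg [] 0 answers
    have hB := pvPlainB context.toList (PySem.List.enumerate context.toList 0) hg [] []
    simp only [hA, hB, List.nil_append, List.isEmpty_nil, if_pos]
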